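-- pv_equiv track=rewrite | github.com/OttoBoop/IA_Educacao_V2 | backend/tests/ui/investor_journey_agent/test_cta_above_fold.py | _extract_css_rule
-- ===== SOURCE A (Python) =====
-- def _extract_css_rule(css_text: str, selector: str) -> str:
--     """Extract a CSS rule block for a selector from CSS text."""
--     results = []
--     idx = 0
--     while True:
--         pos = css_text.find(selector, idx)
--         if pos == -1:
--             break
--         brace_start = css_text.find("{", pos)
--         if brace_start == -1:
--             break
--         depth = 0
--         brace_end = brace_start
--         for i in range(brace_start, len(css_text)):
--             if css_text[i] == "{":
--                 depth += 1
--             elif css_text[i] == "}":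
--                 depth -= 1
--                 if depth == 0:
--                     brace_end = i
--                     break
--         results.append(css_text[pos : brace_end + 1])
--         idx = brace_end + 1
--     return "\n".join(results)
-- ===== SOURCE B (Python) =====
-- def _next_rule(css_text, selector, match, idx):
--     """Return (rule slice, next index) for the first selector hit at or after idx, or None."""
--     p = css_text[idx:].find(selector)
--     if p == -1:
--         return None
--     pos = idx + p
--     q = css_text[pos:].find("{")
--     if q == -1:
--         return None
--     brace = pos + q
--     close = match.get(brace, brace)
--     return css_text[pos:close + 1], close + 1
--
--
-- def _extract_css_rule(css_text: str, selector: str) -> str: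
--     """Extract a CSS rule block for a selector from CSS text."""
--     # One stack pass precomputes, for each '{', the index of its matching '}'.
--     match = {}
--     stack = []
--     for j, c in enumerate(css_text):
--         if c == "{":
--             stack.append(j)
--         elif c == "}" and stack:
--             match[stack.pop()] = j
--     pieces = []
--     idx = 0
--     while True:
--         step = _next_rule(css_text, selector, match, idx)
--         if step is None:
--             break
--         piece, idx = step
--         pieces.append(piece)
--     return "\n".join(pieces)
-- ===== Notes on version B (the rewrite author's own statement) =====
-- stated objective: alternative
-- what changed: A rescans forward from every found '{' counting brace depth; B makes one stack-based pass that precomputes each '{'s matching '}' index in a dict (unmatched '{' defaults to itself), then a step helper working on suffix slices looks up the close index per rule instead of depth-scanning.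
import Mathlib
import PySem

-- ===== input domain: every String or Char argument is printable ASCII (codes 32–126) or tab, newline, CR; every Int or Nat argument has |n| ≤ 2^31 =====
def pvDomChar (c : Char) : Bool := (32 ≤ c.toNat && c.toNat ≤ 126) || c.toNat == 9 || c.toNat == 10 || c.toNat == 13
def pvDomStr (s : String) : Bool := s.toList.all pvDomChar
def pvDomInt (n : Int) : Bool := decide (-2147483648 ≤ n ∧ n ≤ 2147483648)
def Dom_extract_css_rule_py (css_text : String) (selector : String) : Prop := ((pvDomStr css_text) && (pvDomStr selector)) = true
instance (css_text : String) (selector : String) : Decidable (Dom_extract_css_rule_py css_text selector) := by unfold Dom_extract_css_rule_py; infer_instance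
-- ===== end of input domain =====

-- B replaces A's per-'{' depth scan by one stack pass precomputing each '{'s matching '}' in a dict,
-- plus a step helper on suffix slices (alternative decomposition, no depth rescans).

-- ===== PORT A =====
-- A's inner "for i in range(brace_start, len(css_text))" depth scan: remaining chars, i, depth, brace_end.
def pvScanA : List Char → Nat → Int → Nat → Nat
  | [], _, _, be => be
  | c :: rest, i, depth, be =>
    if c = '{' then pvScanA rest (i + 1) (depth + 1) be
    else if c = '}' then
      if depth - 1 = 0 then i
      else pvScanA rest (i + 1) (depth - 1) be
    else pvScanA rest (i + 1) depth be

-- A's "while True" loop (fuel = |css| + 2 suffices: idx strictly increases and stays ≤ |css|).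
def pvLoopA (css sel : List Char) : Nat → Nat → List (List Char) → List (List Char)
  | 0, _, acc => acc
  | fuel + 1, idx, acc =>
    let pos := PySem.Chars.findFrom css sel (idx : Int)
    if pos = -1 then acc
    else
      let bs := PySem.Chars.findFrom css ['{'] pos
      if bs = -1 then acc
      else
        let be := pvScanA (css.drop bs.toNat) bs.toNat 0 bs.toNat
        pvLoopA css sel fuel (be + 1)
          (acc ++ [PySem.List.slice css (some pos) (some ((be : Int) + 1))])

def extract_css_rule_py (css_text : String) (selector : String) : String :=
  String.ofList (PySem.Chars.join ['\n']
    (pvLoopA css_text.toList selector.toList (css_text.toList.length + 2) 0 []))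

-- ===== PORT B =====
-- B's single pass "for j, c in enumerate(css_text)": remaining chars, j, stack of open-'{' indices, match dict.
def pvPassB : List Char → Nat → List Nat → PySem.Dict Nat Nat → PySem.Dict Nat Nat
  | [], _, _, m => m
  | c :: rest, j, stack, m =>
    if c = '{' then pvPassB rest (j + 1) (j :: stack) m
    else if c = '}' then
      match stack with
      | [] => pvPassB rest (j + 1) [] m
      | k :: s => pvPassB rest (j + 1) s (m.insert k j)
    else pvPassB rest (j + 1) stack m

-- B's helper `_next_rule`: works on suffix slices and the precomputed match dict.
def pvStepB (css sel : List Char) (m : PySem.Dict Nat Nat) (idx : Nat) : Option (List Char × Nat) :=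
  let p := PySem.Chars.find (css.drop idx) sel
  if p = -1 then none
  else
    let pos := idx + p.toNat
    let q := PySem.Chars.find (css.drop pos) ['{']
    if q = -1 then none
    else
      let brace := pos + q.toNat
      let close := m.getD brace brace
      some (PySem.List.slice css (some (pos : Int)) (some ((close : Int) + 1)), close + 1)

-- B's "while True: step = _next_rule(...)" loop (same fuel bound).
def pvLoopB (css sel : List Char) (m : PySem.Dict Nat Nat) : Nat → Nat → List (List Char) → List (List Char)
  | 0, _, acc => acc
  | fuel + 1, idx, acc =>
    match pvStepB css sel m idx with
    | none => acc
    | some (piece, nxt) => pvLoopB css sel m fuel nxt (acc ++ [piece])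

def extract_css_rule_py_alt (css_text : String) (selector : String) : String :=
  String.ofList (PySem.Chars.join ['\n']
    (pvLoopB css_text.toList selector.toList
      (pvPassB css_text.toList 0 [] PySem.Dict.empty)
      (css_text.toList.length + 2) 0 []))

-- ===== PRECONDITION & SPEC =====
def Spec_extract_css_rule_py (css_text : String) (selector : String) (out : String) : Prop := out = extract_css_rule_py_alt css_text selector
instance (css_text : String) (selector : String) (out : String) : Decidable (Spec_extract_css_rule_py css_text selector out) := by unfold Spec_extract_css_rule_py; infer_instance

-- ===== CLAIM (what is proved, stated in full; the proofs are below) =====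
def Claim_equal_extract_css_rule_py : Prop := ∀ (css_text : String) (selector : String), Dom_extract_css_rule_py css_text selector → Spec_extract_css_rule_py css_text selector (extract_css_rule_py css_text selector)

-- ===== LEMMAS AND PROOFS =====

-- Invariant of B's stack pass: the stack is strictly decreasing, below the cursor p,
-- and neither the stack entries nor any index ≥ p is a key of the match dict yet.
def pvInv (p : Nat) (stack : List Nat) (m : PySem.Dict Nat Nat) : Prop :=
  stack.Pairwise (· > ·) ∧ (∀ x ∈ stack, x < p) ∧
    (∀ x : Nat, (x ∈ stack ∨ p ≤ x) → m.get? x = none)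

lemma pvInv_push {p : Nat} {stack : List Nat} {m : PySem.Dict Nat Nat}
    (h : pvInv p stack m) : pvInv (p + 1) (p :: stack) m := by
  obtain ⟨h1, h2, h3⟩ := h
  refine ⟨List.pairwise_cons.mpr ⟨fun x hx => h2 x hx, h1⟩, ?_, ?_⟩
  · intro x hx
    rcases List.mem_cons.mp hx with h | h
    · omega
    · have := h2 x h; omega
  · intro x hx
    apply h3
    rcases hx with hx | hx
    · rcases List.mem_cons.mp hx with h | h
      · right; omega
      · exact Or.inl h
    · right; omega

lemma pvInv_skip {p : Nat} {stack : List Nat} {m : PySem.Dict Nat Nat}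
    (h : pvInv p stack m) : pvInv (p + 1) stack m := by
  obtain ⟨h1, h2, h3⟩ := h
  refine ⟨h1, fun x hx => by have := h2 x hx; omega, ?_⟩
  intro x hx
  apply h3
  rcases hx with hx | hx
  · exact Or.inl hx
  · right; omega

lemma pvInv_pop {p k0 : Nat} {s : List Nat} {m : PySem.Dict Nat Nat}
    (h : pvInv p (k0 :: s) m) (j : Nat) : pvInv (p + 1) s (m.insert k0 j) := by
  obtain ⟨h1, h2, h3⟩ := h
  refine ⟨(List.pairwise_cons.mp h1).2, ?_, ?_⟩
  · intro x hx; have := h2 x (by simp [hx]); omega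
  · intro x hx
    have hxne : x ≠ k0 := by
      rcases hx with hx | hx
      · intro e; subst e
        exact absurd ((List.pairwise_cons.mp h1).1 x hx) (by omega)
      · intro e; subst e; have := h2 x (by simp); omega
    rw [PySem.Dict.get?_insert_of_ne m j hxne]
    apply h3
    rcases hx with hx | hx
    · exact Or.inl (by simp [hx])
    · right; omega

-- Keys not on the stack and below the current position are never overwritten by the rest of the pass.
lemma pvPassB_preserves (cs : List Char) : ∀ (p : Nat) (stack : List Nat) (m : PySem.Dict Nat Nat)
    (k : Nat) (v : Nat), k ∉ stack → k < p → m.get? k = some v →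
    (pvPassB cs p stack m).get? k = some v := by
  induction cs with
  | nil => intro p stack m k v _ _ h; simpa [pvPassB] using h
  | cons c rest ih =>
    intro p stack m k v hmem hlt h
    by_cases hbrace : c = '{'
    · rw [pvPassB.eq_def]; dsimp only; rw [if_pos hbrace]
      refine ih (p + 1) (p :: stack) m k v ?_ (by omega) h
      intro hx
      rcases List.mem_cons.mp hx with hx | hx
      · omega
      · exact hmem hx
    · by_cases hclose : c = '}'
      · rw [pvPassB.eq_def]; dsimp only; rw [if_neg hbrace, if_pos hclose]
        match stack, hmem with
        | [], _ => exact ih (p + 1) [] m k v (by simp) (by omega) h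
        | k0 :: s, hmem =>
          have hk0 : k ≠ k0 := fun e => hmem (by simp [e])
          have hks : k ∉ s := fun hs => hmem (by simp [hs])
          exact ih (p + 1) s (m.insert k0 p) k v hks (by omega)
            (by rw [PySem.Dict.get?_insert_of_ne m p hk0]; exact h)
      · rw [pvPassB.eq_def]; dsimp only; rw [if_neg hbrace, if_neg hclose]
        exact ih (p + 1) stack m k v hmem (by omega) h

-- The entry the pass ends up recording for a stack element k with r entries above it
-- is exactly what A's depth scan (currently at depth r+1) would return for k.
lemma pvPassB_spec (cs : List Char) : ∀ (p : Nat) (stack : List Nat) (m : PySem.Dict Nat Nat),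
    pvInv p stack m → ∀ (r k : Nat), stack[r]? = some k →
    (pvPassB cs p stack m).getD k k = pvScanA cs p ((r : Int) + 1) k := by
  induction cs with
  | nil =>
    intro p stack m hinv r k hr
    have hk : k ∈ stack := List.mem_of_getElem? hr
    show ((pvPassB [] p stack m).get? k).getD k = _
    simp [pvPassB, pvScanA, hinv.2.2 k (Or.inl hk)]
  | cons c rest ih =>
    intro p stack m hinv r k hr
    by_cases hbrace : c = '{'
    · rw [pvPassB.eq_def]; dsimp only; rw [if_pos hbrace, pvScanA, if_pos hbrace]
      have hc : (((r + 1 : Nat) : Int)) + 1 = (r : Int) + 1 + 1 := by push_cast; ring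
      have := ih (p + 1) (p :: stack) m (pvInv_push hinv) (r + 1) k (by simpa using hr)
      rw [this, hc]
    · by_cases hclose : c = '}'
      · rw [pvPassB.eq_def]; dsimp only; rw [if_neg hbrace, if_pos hclose, pvScanA, if_neg hbrace, if_pos hclose]
        match stack, hr, hinv with
        | k0 :: s, hr, hinv =>
          match r, hr with
          | 0, hr =>
            have hk : k = k0 := by simpa using hr.symm
            subst hk
            have hnotin : k ∉ s := by
              intro hs
              exact absurd ((List.pairwise_cons.mp hinv.1).1 k hs) (by omega)
            have hget : (pvPassB rest (p + 1) s (m.insert k p)).get? k = some p :=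
              pvPassB_preserves rest (p + 1) s (m.insert k p) k p hnotin
                (by have := hinv.2.1 k (by simp); omega)
                (PySem.Dict.get?_insert_self m k p)
            show ((pvPassB rest (p + 1) s (m.insert k p)).get? k).getD k =
              if ((0 : Int) + 1) - 1 = 0 then p else pvScanA rest (p + 1) (((0 : Int) + 1) - 1) k
            rw [hget, if_pos (by omega)]
            rfl
          | r' + 1, hr =>
            have hk : s[r']? = some k := by simpa using hr
            have := ih (p + 1) s (m.insert k0 p) (pvInv_pop hinv p) r' k hk
            show (pvPassB rest (p + 1) s (m.insert k0 p)).getD k k =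
              if ((((r' + 1 : Nat) : Int)) + 1) - 1 = 0 then p
              else pvScanA rest (p + 1) (((((r' + 1 : Nat) : Int)) + 1) - 1) k
            have hc : (((r' + 1 : Nat) : Int)) + 1 - 1 = (r' : Int) + 1 := by push_cast; ring
            rw [if_neg (by push_cast; omega), this, hc]
      · rw [pvPassB.eq_def]; dsimp only; rw [if_neg hbrace, if_neg hclose, pvScanA, if_neg hbrace, if_neg hclose]
        exact ih (p + 1) stack m (pvInv_skip hinv) r k hr

-- For every '{' in the text, the precomputed match equals A's depth scan started at that '{'.
lemma pvPassB_main (cs : List Char) : ∀ (p : Nat) (stack : List Nat) (m : PySem.Dict Nat Nat),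
    pvInv p stack m → ∀ t : Nat, cs[t]? = some '{' →
    (pvPassB cs p stack m).getD (p + t) (p + t) = pvScanA (cs.drop t) (p + t) 0 (p + t) := by
  induction cs with
  | nil => intro _ _ _ _ t ht; simp at ht
  | cons c rest ih =>
    intro p stack m hinv t ht
    match t, ht with
    | 0, ht =>
      have hc : c = '{' := by simpa using ht
      rw [pvPassB.eq_def]; dsimp only; rw [if_pos hc, List.drop_zero, pvScanA, if_pos hc, Nat.add_zero]
      have := pvPassB_spec rest (p + 1) (p :: stack) m (pvInv_push hinv) 0 p (by simp)
      simpa using this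
    | t' + 1, ht =>
      have ht' : rest[t']? = some '{' := by simpa using ht
      have hshift : p + (t' + 1) = (p + 1) + t' := by omega
      have hdrop : (c :: rest).drop (t' + 1) = rest.drop t' := by simp
      rw [hshift, hdrop]
      by_cases hbrace : c = '{'
      · rw [pvPassB.eq_def]; dsimp only; rw [if_pos hbrace]
        exact ih (p + 1) (p :: stack) m (pvInv_push hinv) t' ht'
      · by_cases hclose : c = '}'
        · rw [pvPassB.eq_def]; dsimp only; rw [if_neg hbrace, if_pos hclose]
          match stack, hinv with
          | [], hinv =>
            exact ih (p + 1) [] m (pvInv_skip hinv) t' ht'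
          | k0 :: s, hinv =>
            exact ih (p + 1) s (m.insert k0 p) (pvInv_pop hinv p) t' ht'
        · rw [pvPassB.eq_def]; dsimp only; rw [if_neg hbrace, if_neg hclose]
          exact ih (p + 1) stack m (pvInv_skip hinv) t' ht'

-- A's depth scan yields an index below any bound dominating both its default and the end of the text.
lemma pvScanA_lt (cs : List Char) : ∀ (p : Nat) (d : Int) (be n : Nat),
    be < n → p + cs.length ≤ n → pvScanA cs p d be < n := by
  induction cs with
  | nil => intro p d be n h _; simpa [pvScanA] using h
  | cons c rest ih =>
    intro p d be n hbe hlen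
    simp only [List.length_cons] at hlen
    by_cases hbrace : c = '{'
    · rw [pvScanA, if_pos hbrace]; exact ih (p + 1) (d + 1) be n hbe (by omega)
    · by_cases hclose : c = '}'
      · rw [pvScanA, if_neg hbrace, if_pos hclose]
        by_cases hd : d - 1 = 0
        · rw [if_pos hd]; omega
        · rw [if_neg hd]; exact ih (p + 1) (d - 1) be n hbe (by omega)
      · rw [pvScanA, if_neg hbrace, if_neg hclose]
        exact ih (p + 1) d be n hbe (by omega)

-- The two loops agree step for step once the precomputed match replaces the depth scan.
lemma pvLoop_eq (css sel : List Char) : ∀ (fuel idx : Nat) (acc : List (List Char)),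
    idx ≤ css.length →
    pvLoopA css sel fuel idx acc =
      pvLoopB css sel (pvPassB css 0 [] PySem.Dict.empty) fuel idx acc := by
  intro fuel
  induction fuel with
  | zero => intro idx acc _; rfl
  | succ fuel ih =>
    intro idx acc hidx
    simp only [pvLoopA, pvLoopB, pvStepB]
    set f := PySem.Chars.find (css.drop idx) sel with hfdef
    by_cases hf : f = -1
    · rw [PySem.Chars.findFrom_natCast css sel idx hidx, ← hfdef, if_pos hf, if_pos rfl, if_pos hf]
    · have hffrom : PySem.Chars.findFrom css sel (idx : Int) = (idx : Int) + f := by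
        rw [PySem.Chars.findFrom_natCast css sel idx hidx, ← hfdef, if_neg hf]
      have hfnn : 0 ≤ f :=
        (PySem.Chars.find_nonneg_iff _ _).mpr ((PySem.Chars.find_ne_neg_one_iff _ _).mp hf)
      have hfle := PySem.Chars.find_le_length (css.drop idx) sel
      rw [hffrom, if_neg (by omega), if_neg hf]
      have hpos : (idx : Int) + f = ((idx + f.toNat : Nat) : Int) := by omega
      set posB := idx + f.toNat with hposBdef
      have hposle : posB ≤ css.length := by
        simp only [List.length_drop] at hfle; omega
      set g := PySem.Chars.find (css.drop posB) ['{'] with hgdef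
      by_cases hg : g = -1
      · rw [hpos, PySem.Chars.findFrom_natCast css ['{'] posB hposle, ← hgdef, if_pos hg,
          if_pos rfl, if_pos hg]
      · have hgnn : 0 ≤ g :=
          (PySem.Chars.find_nonneg_iff _ _).mpr ((PySem.Chars.find_ne_neg_one_iff _ _).mp hg)
        have hbsfrom : PySem.Chars.findFrom css ['{'] ((posB : Nat) : Int) = (posB : Int) + g := by
          rw [PySem.Chars.findFrom_natCast css ['{'] posB hposle, ← hgdef, if_neg hg]
        rw [hpos, hbsfrom, if_neg (by omega), if_neg hg]
        set bsB := posB + g.toNat with hbsBdef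
        have hbscast : ((posB : Int) + g).toNat = bsB := by omega
        have hbs' : PySem.Chars.findFrom css ['{'] ((posB : Nat) : Int) ≠ -1 := by
          rw [hbsfrom]; omega
        obtain ⟨hle, hpre, -⟩ := PySem.Chars.findFrom_natCast_spec css ['{'] posB hposle hbs'
        rw [hbsfrom, hbscast] at hpre
        have hhead : css[bsB]? = some '{' := by
          obtain ⟨tl, htl⟩ := hpre
          have h0 : (css.drop bsB)[0]? = some '{' := by rw [← htl]; rfl
          rw [List.getElem?_drop] at h0
          simpa using h0
        have hbslt : bsB < css.length := by
          by_contra h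
          rw [List.getElem?_eq_none (by omega)] at hhead
          simp at hhead
        have hmain := pvPassB_main css 0 [] PySem.Dict.empty
          ⟨by simp, by simp, fun x _ => PySem.Dict.get?_empty x⟩ bsB hhead
        simp only [Nat.zero_add] at hmain
        have hbound : pvScanA (css.drop bsB) bsB 0 bsB < css.length :=
          pvScanA_lt (css.drop bsB) bsB 0 bsB css.length hbslt
            (by simp only [List.length_drop]; omega)
        rw [hbscast, ← hmain, ← hpos]
        exact ih _ _ (by omega)

-- ===== VERDICT (by name: the statement is the Claim_ definition above) =====
theorem extract_css_rule_py_spec : Claim_equal_extract_css_rule_py := by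
  intro css_text selector _
  show extract_css_rule_py css_text selector = extract_css_rule_py_alt css_text selector
  unfold extract_css_rule_py extract_css_rule_py_alt
  rw [pvLoop_eq css_text.toList selector.toList (css_text.toList.length + 2) 0 [] (by omega)]
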